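-- pv_equiv track=rewrite | github.com/PrakashPrabhu-M/CodingRedumption | Programming essentials simple math/Sum of given series - 1.py | seriesSumI
-- ===== SOURCE A (Python) =====
-- def seriesSumI(n):
--     res=0
--     i=1;j=3
--     while n!=0:
--         res+=i*j
--         i+=2
--         j+=2
--         n-=1
--     return res
-- ===== SOURCE B (Python) =====
-- def seriesSumI(n):
--     return 4 * n * (n + 1) * (2 * n + 1) // 6 - n
-- ===== Notes on version B (the rewrite author's own statement) =====
-- stated objective: faster
-- what changed: Replaces the O(n) accumulation loop over consecutive odd pairs with the closed-form polynomial 4*n*(n+1)*(2*n+1)//6 - n.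
import Mathlib
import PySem

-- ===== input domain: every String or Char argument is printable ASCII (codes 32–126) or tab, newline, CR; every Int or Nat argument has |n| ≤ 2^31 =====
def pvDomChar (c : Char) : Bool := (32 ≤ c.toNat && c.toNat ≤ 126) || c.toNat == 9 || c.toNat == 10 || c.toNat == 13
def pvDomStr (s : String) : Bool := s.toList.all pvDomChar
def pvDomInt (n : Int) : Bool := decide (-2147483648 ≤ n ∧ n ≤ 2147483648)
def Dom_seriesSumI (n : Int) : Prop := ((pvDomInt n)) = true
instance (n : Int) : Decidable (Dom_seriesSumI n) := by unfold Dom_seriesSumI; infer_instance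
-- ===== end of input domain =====

-- B replaces A's O(n) loop with the closed-form polynomial 4n(n+1)(2n+1)/6 - n (asymptotically faster).


-- ===== PORT A =====
-- A's while loop: at each step add i*j to res, step i and j by 2, decrement n;
-- the loop runs exactly n.toNat times when 0 ≤ n (for n < 0 the Python loop never terminates).
def seriesSumILoop (res i j : Int) : Nat → Int
  | 0 => res
  | k + 1 => seriesSumILoop (res + i * j) (i + 2) (j + 2) k

def seriesSumI (n : Int) : Int := seriesSumILoop 0 1 3 n.toNat

-- ===== PORT B =====
def seriesSumI_alt (n : Int) : Int :=
  PySem.Int.floordiv (4 * n * (n + 1) * (2 * n + 1)) 6 - n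

-- ===== PRECONDITION & SPEC =====
-- Pre_ excludes n < 0, on which the Python A's 'while n != 0' loop never terminates.
def Pre_seriesSumI (n : Int) : Prop := 0 ≤ n
instance (n : Int) : Decidable (Pre_seriesSumI n) := by unfold Pre_seriesSumI; infer_instance
def pvWitness_seriesSumI : Int := (5)

def Spec_seriesSumI (n : Int) (out : Int) : Prop := out = seriesSumI_alt n
instance (n : Int) (out : Int) : Decidable (Spec_seriesSumI n out) := by unfold Spec_seriesSumI; infer_instance

-- ===== CLAIM (what is proved, stated in full; the proofs are below) =====
def Claim_equal_seriesSumI : Prop := ∀ (n : Int), Dom_seriesSumI n → Pre_seriesSumI n → Spec_seriesSumI n (seriesSumI n)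

-- ===== LEMMAS AND PROOFS =====

-- Loop invariant: starting from i = 2m+1, j = 2m+3, k iterations add the segment of the series from m to m+k.
theorem seriesSumILoop_closed (k : Nat) : ∀ (res m : Int),
    6 * (seriesSumILoop res (2*m+1) (2*m+3) k - res)
      = 4*(m+k)*(m+k+1)*(2*(m+k)+1) - 4*m*(m+1)*(2*m+1) - 6*k := by
  induction k with
  | zero => intro res m; simp [seriesSumILoop]
  | succ k ih =>
    intro res m
    have h : seriesSumILoop res (2*m+1) (2*m+3) (k+1)
        = seriesSumILoop (res + (2*m+1)*(2*m+3)) (2*(m+1)+1) (2*(m+1)+3) k := by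
      simp [seriesSumILoop]; ring_nf
    rw [h, ]
    have := ih (res + (2*m+1)*(2*m+3)) (m+1)
    push_cast at this ⊢
    linarith [this]

theorem seriesSumI_spec : Claim_equal_seriesSumI := by
  intro n _ hpre
  unfold Spec_seriesSumI seriesSumI seriesSumI_alt
  have hk : (n.toNat : Int) = n := Int.toNat_of_nonneg hpre
  have h := seriesSumILoop_closed n.toNat 0 0
  simp only [mul_zero, zero_mul, zero_add, sub_zero, hk] at h
  -- h : 6 * seriesSumILoop 0 1 3 n.toNat = 4*n*(n+1)*(2*n+1) - 6*n  (after normalising)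
  have hnum : 4 * n * (n + 1) * (2 * n + 1) = 6 * (seriesSumILoop 0 1 3 n.toNat + n) := by
    ring_nf
    ring_nf at h
    linarith
  have : PySem.Int.floordiv (4 * n * (n + 1) * (2 * n + 1)) 6
      = seriesSumILoop 0 1 3 n.toNat + n := by
    rw [hnum]
    simp [PySem.Int.floordiv, Int.mul_fdiv_cancel_left]
  omega
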